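-- pv_equiv track=rewrite | github.com/DavideCorradiDev/advent_of_code_2025 | day3/main.py | max_joltage_old
-- ===== SOURCE A (Python) =====
-- def max_joltage_old(bank):
--     assert(len(bank) > 1)
--     l = 0
--     r = 1
--     for i in range(1, len(bank) - 1):
--         if bank[i] > bank[l]:
--             l = i
--             r = i+1
--         elif bank[i] > bank[r]:
--             r = i
--     if bank[-1] > bank[r]:
--         r = len(bank) - 1
--     return 10 * bank[l] + bank[r]
-- ===== SOURCE B (Python) =====
-- def max_joltage_old(bank):
--     assert len(bank) > 1
--     first = max(bank[:-1])
--     L = bank.index(first)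
--     second = max(bank[L + 1:])
--     return 10 * first + second
-- ===== Notes on version B (the rewrite author's own statement) =====
-- stated objective: simpler
-- what changed: Replaces A's single interleaved greedy pass tracking two indices (l, r) with three shaped passes: max of the prefix bank[:-1], first index of that max, then max of the suffix after it.
import Mathlib
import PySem

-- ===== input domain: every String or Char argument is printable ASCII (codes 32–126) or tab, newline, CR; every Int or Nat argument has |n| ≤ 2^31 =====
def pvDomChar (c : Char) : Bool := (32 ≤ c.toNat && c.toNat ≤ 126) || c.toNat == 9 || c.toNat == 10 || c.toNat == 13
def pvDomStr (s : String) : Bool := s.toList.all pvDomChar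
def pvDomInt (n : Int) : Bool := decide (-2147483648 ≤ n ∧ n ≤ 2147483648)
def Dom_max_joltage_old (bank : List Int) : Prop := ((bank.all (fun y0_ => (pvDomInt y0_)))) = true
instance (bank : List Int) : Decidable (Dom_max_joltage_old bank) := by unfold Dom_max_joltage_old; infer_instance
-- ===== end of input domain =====

-- B replaces A's single interleaved greedy pass over two tracked indices with three
-- shaped passes (prefix max, its first index, suffix max); same O(n) cost, simpler shape.


-- ===== PORT A =====
-- the loop body of A, named so the proofs can speak about it
def pvStep (bank : List Int) (s : Int × Int) (i : Int) : Int × Int :=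
  if PySem.List.pyGetD bank i 0 > PySem.List.pyGetD bank s.1 0 then (i, i + 1)
  else if PySem.List.pyGetD bank i 0 > PySem.List.pyGetD bank s.2 0 then (s.1, i)
  else s

def max_joltage_old (bank : List Int) : Int :=
  let n : Int := PySem.List.len bank
  let s := (PySem.List.pyRange 1 (n - 1) 1).foldl (pvStep bank) ((0 : Int), (1 : Int))
  let r : Int := if PySem.List.pyGetD bank (-1) 0 > PySem.List.pyGetD bank s.2 0 then n - 1 else s.2
  10 * PySem.List.pyGetD bank s.1 0 + PySem.List.pyGetD bank r 0

-- ===== PORT B =====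
def max_joltage_old_alt (bank : List Int) : Int :=
  match PySem.List.max? (PySem.List.slice bank none (some (-1))) (fun x => x) with
  | none => 0
  | some first =>
    match PySem.List.index? bank first with
    | none => 0
    | some L =>
      match PySem.List.max? (PySem.List.slice bank (some ((L : Int) + 1)) none) (fun x => x) with
      | none => 0
      | some second => 10 * first + second

-- ===== PRECONDITION & SPEC =====
-- A asserts len(bank) > 1 (AssertionError otherwise); Pre_ is exactly that.
def Pre_max_joltage_old (bank : List Int) : Prop := 1 < bank.length
instance (bank : List Int) : Decidable (Pre_max_joltage_old bank) := by unfold Pre_max_joltage_old; infer_instance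
def pvWitness_max_joltage_old : List Int := [3, 1, 4]

def Spec_max_joltage_old (bank : List Int) (out : Int) : Prop := out = max_joltage_old_alt bank
instance (bank : List Int) (out : Int) : Decidable (Spec_max_joltage_old bank out) := by unfold Spec_max_joltage_old; infer_instance

-- ===== CLAIM (what is proved, stated in full; the proofs are below) =====
def Claim_equal_max_joltage_old : Prop := ∀ (bank : List Int), Dom_max_joltage_old bank → Pre_max_joltage_old bank → Spec_max_joltage_old bank (max_joltage_old bank)

-- ===== LEMMAS AND PROOFS =====

-- invariant of A's loop after processing indices 1..k-1 (state s = (l, r))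
def pvInv (xs : List Int) (k : Nat) (s : Int × Int) : Prop :=
  ∃ l r : Nat, s = ((l : Int), (r : Int)) ∧ l < k ∧ l < r ∧ r ≤ k ∧
    (∀ j, j < k → xs.getD j 0 ≤ xs.getD l 0) ∧
    (∀ j, j < l → xs.getD j 0 < xs.getD l 0) ∧
    (l + 1 = k → r = k) ∧
    (l + 1 < k → r < k ∧ ∀ j, l < j → j < k → xs.getD j 0 ≤ xs.getD r 0)

lemma pvStep_inv (xs : List Int) (k : Nat) (s : Int × Int)
    (h : pvInv xs k s) : pvInv xs (k + 1) (pvStep xs s (k : Int)) := by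
  obtain ⟨l, r, hs, hlk, hlr, hrk, hmax, hfirst, heq, hlt⟩ := h
  subst hs
  simp only [pvStep, PySem.List.pyGetD_natCast]
  by_cases h1 : xs.getD k 0 > xs.getD l 0
  · simp only [h1, if_pos]
    refine ⟨k, k + 1, by push_cast; ring_nf, by omega, by omega, by omega, ?_, ?_, by omega, by omega⟩
    · intro j hj
      rcases Nat.lt_succ_iff_lt_or_eq.mp hj with hj' | hj'
      · exact le_of_lt (lt_of_le_of_lt (hmax j hj') h1)
      · subst hj'; exact le_refl _
    · intro j hj; exact lt_of_le_of_lt (hmax j hj) h1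
  · simp only [h1, if_false]
    by_cases h2 : xs.getD k 0 > xs.getD r 0
    · simp only [h2, if_pos]
      -- here r ≠ k (else the compared values are equal), hence l + 1 < k
      have hrne : r ≠ k := by rintro rfl; exact lt_irrefl _ h2
      have hl1 : l + 1 < k := by
        rcases Nat.lt_or_ge (l + 1) k with h' | h'
        · exact h'
        · exact absurd (heq (by omega)) hrne
      obtain ⟨hrk', hrmax⟩ := hlt hl1
      refine ⟨l, k, rfl, by omega, by omega, by omega, ?_, hfirst, by omega, ?_⟩
      · intro j hj
        rcases Nat.lt_succ_iff_lt_or_eq.mp hj with hj' | hj'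
        · exact hmax j hj'
        · subst hj'; exact le_of_not_gt h1
      · intro _
        refine ⟨by omega, ?_⟩
        intro j hlj hj
        rcases Nat.lt_succ_iff_lt_or_eq.mp hj with hj' | hj'
        · exact le_trans (hrmax j hlj hj') (le_of_lt h2)
        · subst hj'; exact le_refl _
    · simp only [h2, if_false]
      refine ⟨l, r, rfl, by omega, hlr, by omega, ?_, hfirst, by omega, ?_⟩
      · intro j hj
        rcases Nat.lt_succ_iff_lt_or_eq.mp hj with hj' | hj'
        · exact hmax j hj'
        · subst hj'; exact le_of_not_gt h1
      · intro _
        refine ⟨by omega, ?_⟩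
        intro j hlj hj
        rcases Nat.lt_succ_iff_lt_or_eq.mp hj with hj' | hj'
        · rcases Nat.lt_or_ge (l + 1) k with h' | h'
          · exact (hlt h').2 j hlj hj'
          · omega
        · rw [hj']
          rcases Nat.lt_or_ge (l + 1) k with h' | h'
          · exact le_of_not_gt h2
          · have hre : r = k := heq (by omega)
            rw [hre]

lemma pvFold_inv (xs : List Int) (k : Nat) (hk : 1 ≤ k) :
    pvInv xs k ((PySem.List.pyRange 1 (k : Int) 1).foldl (pvStep xs) ((0 : Int), (1 : Int))) := by
  induction k with
  | zero => omega
  | succ m ih =>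
    rcases Nat.lt_or_ge m 1 with hm | hm
    · have : m = 0 := by omega
      subst this
      rw [PySem.List.pyRange_one_eq_nil (by norm_num)]
      exact ⟨0, 1, by norm_num, by omega, by omega, by omega,
        by intro j hj; interval_cases j; exact le_refl _,
        by intro j hj; omega, by omega, by omega⟩
    · have hsplit : PySem.List.pyRange 1 ((m + 1 : Nat) : Int) 1
          = PySem.List.pyRange 1 (m : Int) 1 ++ [(m : Int)] := by
        have : ((m + 1 : Nat) : Int) = (m : Int) + 1 := by push_cast; ring
        rw [this, PySem.List.pyRange_one_succ_right (by exact_mod_cast hm)]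
      rw [hsplit, List.foldl_append]
      simpa using pvStep_inv xs m _ (ih hm)

lemma pv_mem_drop_iff (xs : List Int) (m : Nat) (y : Int) :
    y ∈ xs.drop m ↔ ∃ j, m ≤ j ∧ j < xs.length ∧ xs.getD j 0 = y := by
  have hlen : (xs.drop m).length = xs.length - m := by simp
  constructor
  · intro hy
    obtain ⟨i, hi, hget⟩ := List.mem_iff_getElem.mp hy
    refine ⟨m + i, by omega, by omega, ?_⟩
    rw [List.getD_eq_getElem xs 0 (by omega), ← List.getElem_drop]
    exact hget
  · rintro ⟨j, hmj, hj, hget⟩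
    refine List.mem_iff_getElem.mpr ⟨j - m, by omega, ?_⟩
    have h1 : m + (j - m) = j := by omega
    rw [List.getElem_drop, ← List.getD_eq_getElem xs 0 (by omega : m + (j - m) < xs.length)]
    rw [h1]; exact hget

lemma pv_mem_dropLast_iff (xs : List Int) (y : Int) :
    y ∈ xs.dropLast ↔ ∃ j, j + 1 < xs.length ∧ xs.getD j 0 = y := by
  rw [List.dropLast_eq_take]
  have hlen : (xs.take (xs.length - 1)).length = min (xs.length - 1) xs.length := by simp
  constructor
  · intro hy
    obtain ⟨i, hi, hget⟩ := List.mem_iff_getElem.mp hy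
    refine ⟨i, by omega, ?_⟩
    rw [List.getD_eq_getElem xs 0 (by omega), ← List.getElem_take]
    exact hget
  · rintro ⟨j, hj, hget⟩
    refine List.mem_iff_getElem.mpr ⟨j, by omega, ?_⟩
    rw [List.getElem_take, ← List.getD_eq_getElem xs 0 (by omega : j < xs.length)]
    exact hget

lemma pvGetD_eq_getElem (xs : List Int) (j : Nat) (h : j < xs.length) :
    xs.getD j 0 = xs[j] := List.getD_eq_getElem xs 0 h

-- ===== VERDICT (by name: the statement is the Claim_ definition above) =====
theorem max_joltage_old_spec : Claim_equal_max_joltage_old := by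
  intro bank _ hpre
  unfold Spec_max_joltage_old
  unfold Pre_max_joltage_old at hpre
  have hnil : bank ≠ [] := by intro h; rw [h] at hpre; simp at hpre
  set n := bank.length with hn
  have hcast : (PySem.List.len bank : Int) - 1 = ((n - 1 : Nat) : Int) := by
    simp [PySem.List.len_eq]; omega
  obtain ⟨l, r, hs, hlk, hlr, hrk, hmax, hfirst, heq, hlt⟩ :=
    pvFold_inv bank (n - 1) (by omega)
  -- characterize A
  have hlast : PySem.List.pyGetD bank (-1) 0 = bank.getD (n - 1) 0 := by
    rw [PySem.List.pyGetD_neg_one bank 0 hnil, List.getLast_eq_getElem,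
      pvGetD_eq_getElem bank (n - 1) (by omega)]
  have hA : max_joltage_old bank =
      10 * bank.getD l 0 +
        (if bank.getD (n - 1) 0 > bank.getD r 0 then bank.getD (n - 1) 0
         else bank.getD r 0) := by
    simp only [max_joltage_old]
    rw [hcast, hs, hlast]
    simp only [PySem.List.pyGetD_natCast]
    by_cases hc : bank.getD (n - 1) 0 > bank.getD r 0
    · rw [if_pos hc, if_pos hc, PySem.List.pyGetD_natCast]
    · rw [if_neg hc, if_neg hc, PySem.List.pyGetD_natCast]
  -- characterize B
  have hdl : PySem.List.slice bank none (some (-1)) = bank.dropLast :=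
    PySem.List.slice_to_neg_one ..
  cases hM : PySem.List.max? bank.dropLast (fun x => x) with
  | none =>
      exfalso
      rw [PySem.List.max?_eq_none_iff] at hM
      have := congrArg List.length hM
      simp at this; omega
  | some M =>
    have hMmem : M ∈ bank.dropLast := PySem.List.max?_mem hM
    have hMmax : ∀ y ∈ bank.dropLast, y ≤ M := by
      have := PySem.List.max?_isMax hM; simpa using this
    have hMbank : M ∈ bank := List.mem_of_mem_dropLast hMmem
    cases hL : PySem.List.index? bank M with
    | none =>
        rw [PySem.List.index?_eq_none_iff] at hL
        exact absurd hMbank hL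
    | some L =>
      obtain ⟨hLlt, hLget, hLfirst⟩ := PySem.List.getElem_of_index?_eq_some hL
      -- bank.getD l 0 = M
      have hlM : bank.getD l 0 = M := by
        refine le_antisymm (hMmax _ ?_) ?_
        · exact (pv_mem_dropLast_iff bank _).mpr ⟨l, by omega, rfl⟩
        · obtain ⟨j, hj, hjget⟩ := (pv_mem_dropLast_iff bank M).mp hMmem
          rw [← hjget]; exact hmax j (by omega)
      -- l = L
      have hlL : l = L := by
        rcases lt_trichotomy l L with h | h | h
        · exact absurd (by rw [← pvGetD_eq_getElem bank l (by omega)]; exact hlM)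
            (hLfirst l h)
        · exact h
        · exfalso
          have h1 : bank.getD L 0 < bank.getD l 0 := hfirst L h
          rw [hlM, pvGetD_eq_getElem bank L hLlt, hLget] at h1
          exact lt_irrefl _ h1
      subst hlL
      have hdrop : PySem.List.slice bank (some ((l : Int) + 1)) none = bank.drop (l + 1) := by
        have h1 : ((l : Int) + 1) = ((l + 1 : Nat) : Int) := by push_cast; ring
        rw [h1, PySem.List.slice_from_natCast]
      cases hS : PySem.List.max? (bank.drop (l + 1)) (fun x => x) with
      | none =>
          exfalso
          rw [PySem.List.max?_eq_none_iff] at hS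
          have := congrArg List.length hS
          simp at this; omega
      | some S =>
        have hSmem : S ∈ bank.drop (l + 1) := PySem.List.max?_mem hS
        have hSmax : ∀ y ∈ bank.drop (l + 1), y ≤ S := by
          have := PySem.List.max?_isMax hS; simpa using this
        -- the second addend of A equals S
        have hVS : (if bank.getD (n - 1) 0 > bank.getD r 0 then bank.getD (n - 1) 0
            else bank.getD r 0) = S := by
          have hVr : bank.getD r 0 ≤
              (if bank.getD (n - 1) 0 > bank.getD r 0 then bank.getD (n - 1) 0
               else bank.getD r 0) := by
            split_ifs with h
            · exact le_of_lt h
            · exact le_refl _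
          have hVn : bank.getD (n - 1) 0 ≤
              (if bank.getD (n - 1) 0 > bank.getD r 0 then bank.getD (n - 1) 0
               else bank.getD r 0) := by
            split_ifs with h
            · exact le_refl _
            · exact le_of_not_gt h
          refine le_antisymm ?_ ?_
          · split_ifs with h
            · exact hSmax _ ((pv_mem_drop_iff bank (l + 1) _).mpr
                ⟨n - 1, by omega, by omega, rfl⟩)
            · exact hSmax _ ((pv_mem_drop_iff bank (l + 1) _).mpr
                ⟨r, by omega, by omega, rfl⟩)
          · obtain ⟨j, hj1, hj2, hjget⟩ := (pv_mem_drop_iff bank (l + 1) S).mp hSmem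
            rcases Nat.lt_or_ge j (n - 1) with hjn | hjn
            · have hj3 : bank.getD j 0 ≤ bank.getD r 0 := by
                rcases Nat.lt_or_ge (l + 1) (n - 1) with h' | h'
                · exact (hlt h').2 j (by omega) hjn
                · omega
              rw [← hjget]; exact le_trans hj3 hVr
            · have hj4 : j = n - 1 := by omega
              rw [← hjget, hj4]; exact hVn
        -- assemble
        rw [hA, hlM, hVS]
        simp only [max_joltage_old_alt, hdl, hM, hL, hdrop, hS]
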